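-- pv_equiv track=rewrite | github.com/mwana/mwana-new-core | mwana/apps/labresults/messages.py | combine_to_length
-- ===== SOURCE A (Python) =====
-- def combine_to_length(list, delimiter=". ", length=160):
--     """
--     Combine a list of strings to a maximum of a specified length, using the
--     delimiter to separate them.  Returns the combined strings and the
--     remainder as a tuple.
--     """
--     if not list:  return ("", [])
--     if len(list[0]) > length:
--         raise Exception("None of the messages will fit in the specified length of %s" % length)
--
--     msg = ""
--     for i in range(len(list)):
--         item = list[i]
--         new_msg = item if not msg else msg + delimiter + item
--         if len(new_msg) <= length:
--             msg = new_msg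
--         else:
--             return (msg, list[i:])
--     return (msg, [])
-- ===== SOURCE B (Python) =====
-- def combine_to_length(list, delimiter=". ", length=160):
--     """
--     Combine a list of strings to a maximum of a specified length, using the
--     delimiter to separate them.  Returns the combined strings and the
--     remainder as a tuple.
--     """
--     if not list:
--         return ("", [])
--     if len(list[0]) > length:
--         raise Exception("None of the messages will fit in the specified length of %s" % length)
--     # Find the split point first, tracking only the running message length:
--     # the first item costs its own length, each further one costs
--     # len(delimiter) + its length.
--     total = 0
--     count = 0
--     for item in list:
--         add = len(item) if count == 0 else len(delimiter) + len(item)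
--         if total + add > length:
--             break
--         total += add
--         count += 1
--     return (delimiter.join(list[:count]), list[count:])
-- ===== Notes on version B (the rewrite author's own statement) =====
-- stated objective: alternative
-- what changed: B computes the split point first with an integer running-length loop and then produces the message by one delimiter.join over a slice, instead of A's incremental string concatenation inside the loop; Pre_ excludes inputs where A raises (first item longer than length) and the unspecified corner of a list starting with an empty string, where A drops the leading empty items without a delimiter while B joins them — both values defensible.
-- outside the precondition, e.g. on combine_to_length(['', 'a'], '. ', 10): A returns ('a', []), B returns ('. a', [])
import Mathlib
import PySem

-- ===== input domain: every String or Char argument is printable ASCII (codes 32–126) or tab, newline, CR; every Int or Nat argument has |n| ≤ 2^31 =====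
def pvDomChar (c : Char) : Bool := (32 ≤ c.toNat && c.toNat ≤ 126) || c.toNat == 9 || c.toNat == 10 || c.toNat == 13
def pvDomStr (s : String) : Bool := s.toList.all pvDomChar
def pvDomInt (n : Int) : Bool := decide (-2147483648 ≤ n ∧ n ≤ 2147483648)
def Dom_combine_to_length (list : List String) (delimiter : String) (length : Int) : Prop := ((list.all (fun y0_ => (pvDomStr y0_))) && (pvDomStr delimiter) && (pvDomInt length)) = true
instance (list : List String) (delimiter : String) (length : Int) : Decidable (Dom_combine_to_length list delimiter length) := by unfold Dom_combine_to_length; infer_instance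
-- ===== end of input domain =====

-- B finds the split point with an integer running-length loop and builds the message with one
-- delimiter.join over a slice, instead of A's incremental string concatenation (alternative decomposition).

-- ===== PORT A =====
-- the for-i loop of A, with `list[i:]` carried structurally as `item :: rs`
def ctlLoopA (delimiter : String) (length : Int) (msg : String) : List String → String × List String
  | [] => (msg, [])
  | item :: rs =>
    let new_msg := if msg = "" then item else msg ++ delimiter ++ item
    if PySem.Str.len new_msg ≤ length then ctlLoopA delimiter length new_msg rs
    else (msg, item :: rs)

def combine_to_length (list : List String) (delimiter : String) (length : Int) : String × List String :=
  if list = [] then ("", [])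
  else if length < PySem.Str.len list.headI then ("", [])  -- Python raises here; excluded by Pre_
  else ctlLoopA delimiter length "" list

-- ===== PORT B =====
-- B's for loop: running total length and count, break on overflow
def ctlCountLoop (delimiter : String) (length : Int) : List String → Int → Nat → Nat
  | [], _, count => count
  | item :: rs, total, count =>
    let add := if count = 0 then PySem.Str.len item else PySem.Str.len delimiter + PySem.Str.len item
    if length < total + add then count
    else ctlCountLoop delimiter length rs (total + add) (count + 1)

def combine_to_length_alt (list : List String) (delimiter : String) (length : Int) : String × List String :=
  if list = [] then ("", [])
  else if length < PySem.Str.len list.headI then ("", [])  -- Python raises here; excluded by Pre_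
  else
    let count := ctlCountLoop delimiter length list 0 0
    (PySem.Str.join delimiter (list.take count), list.drop count)

-- ===== PRECONDITION & SPEC =====
-- Pre_ excludes the inputs where A raises (a first item longer than `length`) and the unspecified
-- corner of a non-empty list starting with an empty string, where A drops leading empty items
-- without a delimiter while B joins them — both values are defensible.
def Pre_combine_to_length (list : List String) (delimiter : String) (length : Int) : Prop :=
  list = [] ∨ (list.headI ≠ "" ∧ PySem.Str.len list.headI ≤ length)
instance (list : List String) (delimiter : String) (length : Int) : Decidable (Pre_combine_to_length list delimiter length) := by unfold Pre_combine_to_length; infer_instance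

def pvWitness_combine_to_length : List String × String × Int := (["ab", "cd", "ef"], ". ", 7)

def Spec_combine_to_length (list : List String) (delimiter : String) (length : Int) (out : String × List String) : Prop := out = combine_to_length_alt list delimiter length
instance (list : List String) (delimiter : String) (length : Int) (out : String × List String) : Decidable (Spec_combine_to_length list delimiter length out) := by unfold Spec_combine_to_length; infer_instance

-- ===== CLAIM =====
def Claim_equal_combine_to_length : Prop := ∀ (list : List String) (delimiter : String) (length : Int), Dom_combine_to_length list delimiter length → Pre_combine_to_length list delimiter length → Spec_combine_to_length list delimiter length (combine_to_length list delimiter length)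

-- ===== LEMMAS AND PROOFS =====

theorem strlen_eq_zero_iff (m : String) : PySem.Str.len m = 0 ↔ m = "" := by
  rw [PySem.Str.len_eq, ← String.toList_eq_nil_iff, ← List.length_eq_zero_iff]
  omega

theorem strlen_nonneg (m : String) : 0 ≤ PySem.Str.len m := by
  rw [PySem.Str.len_eq]; positivity

theorem append_ne_empty_left (m s : String) (h : m ≠ "") : m ++ s ≠ "" := by
  intro hc
  have hm : PySem.Str.len m ≠ 0 := fun h0 => h ((strlen_eq_zero_iff m).mp h0)
  have := congrArg PySem.Str.len hc
  rw [PySem.Str.len_append] at this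
  have h1 := strlen_nonneg m
  have h2 := strlen_nonneg s
  have : PySem.Str.len m + PySem.Str.len s = 0 := by simpa using this
  omega

-- the tail `d++x1++d++x2++…` of a join
def joinTail (d : String) : List String → String
  | [] => ""
  | x :: rs => d ++ x ++ joinTail d rs

theorem join_eq_joinTail (d x : String) (rs : List String) :
    PySem.Str.join d (x :: rs) = x ++ joinTail d rs := by
  induction rs generalizing x with
  | nil => simp [PySem.Str.join, PySem.Chars.join_singleton, joinTail]
  | cons y rs ih =>
    have h := ih y
    simp only [joinTail]
    have : PySem.Str.join d (x :: y :: rs) = x ++ d ++ PySem.Str.join d (y :: rs) := by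
      simp [PySem.Str.join, PySem.Chars.join_cons_cons]
      rw [String.append_assoc]
    rw [this, h]
    simp [String.append_assoc]

-- A's fold step
def stepA (d m item : String) : String := if m = "" then item else m ++ d ++ item

theorem foldA_of_ne_empty (d : String) :
    ∀ (rs : List String) (m : String), m ≠ "" → rs.foldl (stepA d) m = m ++ joinTail d rs := by
  intro rs
  induction rs with
  | nil => intro m _; simp [joinTail]
  | cons y rs ih =>
    intro m hm
    have hm' : m ++ d ++ y ≠ "" := by
      rw [String.append_assoc]; exact append_ne_empty_left m (d ++ y) hm
    simp only [List.foldl, stepA, if_neg hm, joinTail]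
    rw [ih _ hm']
    simp [String.append_assoc]

-- B's count never decreases below its count argument
theorem ctlCountLoop_ge (d : String) (L : Int) :
    ∀ (rs : List String) (t : Int) (c : Nat), c ≤ ctlCountLoop d L rs t c := by
  intro rs
  induction rs with
  | nil => intro t c; simp [ctlCountLoop]
  | cons x rs ih =>
    intro t c
    simp only [ctlCountLoop]
    split <;> split
    all_goals first
      | exact le_refl c
      | exact le_trans (Nat.le_succ c) (ih _ (c + 1))

-- accumulator shift for B's loop once the count is positive
theorem ctlCountLoop_shift (d : String) (L : Int) :
    ∀ (rs : List String) (t : Int) (c : Nat),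
      ctlCountLoop d L rs t (c + 1) = c + ctlCountLoop d L rs t 1 := by
  intro rs
  induction rs with
  | nil => intro t c; simp [ctlCountLoop]
  | cons x rs ih =>
    intro t c
    simp only [ctlCountLoop]
    have h1 : ¬ (c + 1 = 0) := by omega
    have h2 : ¬ ((1 : Nat) = 0) := by omega
    simp only [if_neg h1, if_neg h2]
    split
    · rfl
    · rw [show c + 1 + 1 = (c + 1) + 1 from rfl, ih _ (c + 1), ih _ 1]
      omega

-- main loop correspondence for a non-empty accumulated message
theorem loop_eq_pos (d : String) (L : Int) :
    ∀ (rest : List String) (m : String), m ≠ "" →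
      ctlLoopA d L m rest =
        ((rest.take (ctlCountLoop d L rest (PySem.Str.len m) 1 - 1)).foldl (stepA d) m,
         rest.drop (ctlCountLoop d L rest (PySem.Str.len m) 1 - 1)) := by
  intro rest
  induction rest with
  | nil => intro m _; simp [ctlLoopA, ctlCountLoop]
  | cons item rs ih =>
    intro m hm
    simp only [ctlLoopA, ctlCountLoop, if_neg hm, if_neg (by omega : ¬ ((1 : Nat) = 0))]
    have hlen2 : PySem.Str.len (m ++ d ++ item) = PySem.Str.len m + (PySem.Str.len d + PySem.Str.len item) := by
      rw [String.append_assoc, PySem.Str.len_append, PySem.Str.len_append]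
    by_cases hfit : PySem.Str.len (m ++ d ++ item) ≤ L
    · have hL : ¬ L < PySem.Str.len m + (PySem.Str.len d + PySem.Str.len item) := by omega
      rw [if_pos hfit, if_neg hL]
      have hm' : m ++ d ++ item ≠ "" := by
        rw [String.append_assoc]; exact append_ne_empty_left m (d ++ item) hm
      have hsh : ctlCountLoop d L rs (PySem.Str.len m + (PySem.Str.len d + PySem.Str.len item)) (1 + 1)
          = 1 + ctlCountLoop d L rs (PySem.Str.len m + (PySem.Str.len d + PySem.Str.len item)) 1 :=
        ctlCountLoop_shift d L rs _ 1
      rw [ih _ hm', hlen2, hsh]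
      set K := ctlCountLoop d L rs (PySem.Str.len m + (PySem.Str.len d + PySem.Str.len item)) 1 with hK
      have hK1 : 1 ≤ K := ctlCountLoop_ge d L rs _ 1
      have htake : (1 : Nat) + K - 1 = (K - 1) + 1 := by omega
      rw [htake, List.take_succ_cons, List.drop_succ_cons, List.foldl_cons]
      simp [stepA, if_neg hm]
    · have hL : L < PySem.Str.len m + (PySem.Str.len d + PySem.Str.len item) := by omega
      rw [if_neg hfit, if_pos hL]
      simp

-- ===== VERDICT =====
theorem combine_to_length_spec : Claim_equal_combine_to_length := by
  intro list delimiter length _hdom hpre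
  unfold Spec_combine_to_length combine_to_length combine_to_length_alt
  cases list with
  | nil => simp
  | cons h t =>
    rcases hpre with hnil | ⟨hne, hle⟩
    · exact absurd hnil (by simp)
    · simp only [List.headI] at hne hle
      have hguard : ¬ length < PySem.Str.len (List.headI (h :: t)) := by
        simp only [List.headI]; omega
      simp only [if_neg (by simp : ¬ (h :: t = [])), if_neg hguard]
      -- unfold one step of each loop
      have hA : ctlLoopA delimiter length "" (h :: t) = ctlLoopA delimiter length h t := by
        simp only [ctlLoopA]
        simp
        intro hlt
        rw [PySem.Str.len_eq] at hle
        simp only [String.length_toList] at hle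
        omega
      have hB : ctlCountLoop delimiter length (h :: t) 0 0 =
          ctlCountLoop delimiter length t (PySem.Str.len h) 1 := by
        simp only [ctlCountLoop]
        simp
        intro hlt
        rw [PySem.Str.len_eq] at hle
        simp only [String.length_toList] at hle
        omega
      rw [hA, hB, loop_eq_pos delimiter length t h hne]
      set K := ctlCountLoop delimiter length t (PySem.Str.len h) 1 with hK
      have hK1 : 1 ≤ K := ctlCountLoop_ge delimiter length t _ 1
      have htake : K = (K - 1) + 1 := by omega
      rw [htake, List.take_succ_cons, List.drop_succ_cons]
      rw [join_eq_joinTail, ← foldA_of_ne_empty delimiter _ h hne]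
      simp
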